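-- pv_equiv track=rewrite | github.com/Remmy04/My-Python-Projects | ML & PC Week 3 Practical 2/Semantic Network.py | get_habitats
-- ===== SOURCE A (Python) =====
-- knowledge = {
--     'Bat': {'is_a': 'Mammal', 'has': ['Wings'], 'lives_in': ['Caves']},
--     'Cat': {'is_a': 'Mammal', 'lives_in': ['House']},
--     'Dog': {'is_a': 'Mammal', 'lives_in': ['House']},
--     'Penguin': {'is_a': 'Bird', 'has': ['Flippers'], 'lives_in': ['Antarctica']},
--     'Parrot': {'is_a': 'Bird', 'has': ['Can Talk'], 'lives_in': ['Rainforest']},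
--     'Whale': {'is_a': 'Mammal', 'has': ['Blubber', 'Flippers'], 'lives_in': ['Ocean']},
--     'Bird': {'is_a': 'Animal', 'has': ['Feathers', 'Beak']},
--     'Mammal': {'is_a': 'Animal', 'has': ['Fur', 'Warm Blood']},
--     'Animal': {'has': ['Heart', 'Legs']}
-- }
--
-- def get_habitats(entity):
--     habitats = []  # Empty list for habitats
--     while entity in knowledge:
--         if 'lives_in' in knowledge[entity]:  # Add habitats if available
--             habitats += knowledge[entity]['lives_in']
--         if 'is_a' in knowledge[entity]:  # Move to parent entity
--             entity = knowledge[entity]['is_a']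
--         else:  # End loop if no parent
--             break
--     return habitats
-- ===== SOURCE B (Python) =====
-- knowledge = {
--     'Bat': {'is_a': 'Mammal', 'has': ['Wings'], 'lives_in': ['Caves']},
--     'Cat': {'is_a': 'Mammal', 'lives_in': ['House']},
--     'Dog': {'is_a': 'Mammal', 'lives_in': ['House']},
--     'Penguin': {'is_a': 'Bird', 'has': ['Flippers'], 'lives_in': ['Antarctica']},
--     'Parrot': {'is_a': 'Bird', 'has': ['Can Talk'], 'lives_in': ['Rainforest']},
--     'Whale': {'is_a': 'Mammal', 'has': ['Blubber', 'Flippers'], 'lives_in': ['Ocean']},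
--     'Bird': {'is_a': 'Animal', 'has': ['Feathers', 'Beak']},
--     'Mammal': {'is_a': 'Animal', 'has': ['Fur', 'Warm Blood']},
--     'Animal': {'has': ['Heart', 'Legs']}
-- }
--
-- def _ancestor_chain(entity):
--     """Stage 1: the entity followed by its transitive is_a ancestors,
--     restricted to entities present in knowledge."""
--     chain = []
--     cur = entity
--     while cur in knowledge:
--         chain.append(cur)
--         cur = knowledge[cur].get('is_a')
--         if cur is None:
--             break
--     return chain
--
-- def get_habitats(entity):
--     # Stage 2: flatten the lives_in lists of every entity on the chain.
--     return [h for e in _ancestor_chain(entity)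
--               for h in knowledge[e].get('lives_in', [])]
-- ===== Notes on version B (the rewrite author's own statement) =====
-- stated objective: alternative
-- what changed: Replaces A's single while-loop that mutates the entity variable and grows an accumulator by a two-stage pipeline: first collect the entity's is_a ancestor chain as a list, then flatten the lives_in lists of the chain with a comprehension.
import Mathlib
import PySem

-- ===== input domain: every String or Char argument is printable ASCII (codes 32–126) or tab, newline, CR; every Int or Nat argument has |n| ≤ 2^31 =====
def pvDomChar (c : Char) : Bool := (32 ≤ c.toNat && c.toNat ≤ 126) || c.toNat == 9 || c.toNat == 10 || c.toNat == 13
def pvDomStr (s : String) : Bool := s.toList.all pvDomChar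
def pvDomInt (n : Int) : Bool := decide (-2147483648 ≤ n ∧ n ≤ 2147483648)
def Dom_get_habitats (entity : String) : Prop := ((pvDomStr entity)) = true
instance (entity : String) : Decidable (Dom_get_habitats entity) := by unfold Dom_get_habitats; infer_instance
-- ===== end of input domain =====

-- ===== PORT A =====
-- One honest line: B replaces A's while-loop with a mutated entity and growing accumulator
-- by a two-stage pipeline (collect the is_a ancestor chain, then flatten the lives_in lists);
-- same values, same order, no side effects in either version.
-- Knowledge node: only the keys get_habitats reads ('is_a', 'lives_in'); 'has' is never used.
structure PvNode where
  is_a : Option String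
  lives_in : Option (List String)
deriving DecidableEq, Repr

def pvKnowledge : PySem.Dict String PvNode := PySem.Dict.ofList
  [ ("Bat",     { is_a := some "Mammal", lives_in := some ["Caves"] }),
    ("Cat",     { is_a := some "Mammal", lives_in := some ["House"] }),
    ("Dog",     { is_a := some "Mammal", lives_in := some ["House"] }),
    ("Penguin", { is_a := some "Bird",   lives_in := some ["Antarctica"] }),
    ("Parrot",  { is_a := some "Bird",   lives_in := some ["Rainforest"] }),
    ("Whale",   { is_a := some "Mammal", lives_in := some ["Ocean"] }),
    ("Bird",    { is_a := some "Animal", lives_in := none }),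
    ("Mammal",  { is_a := some "Animal", lives_in := none }),
    ("Animal",  { is_a := none,          lives_in := none }) ]

-- A's while loop, step for step; fuel 10 > number of knowledge entries, and the fixed
-- is_a chains are acyclic with length ≤ 3, so the fuel is never exhausted: the loop is exact.
def pvLoopA (fuel : Nat) (entity : String) (habitats : List String) : List String :=
  match fuel with
  | 0 => habitats
  | fuel + 1 =>
    match PySem.Dict.get? pvKnowledge entity with
    | none => habitats                              -- while condition fails
    | some node =>
      let habitats := match node.lives_in with      -- if 'lives_in' in knowledge[entity]
        | some hs => habitats ++ hs
        | none => habitats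
      match node.is_a with
      | some parent => pvLoopA fuel parent habitats -- entity = knowledge[entity]['is_a']
      | none => habitats                            -- break

def get_habitats (entity : String) : List String := pvLoopA 10 entity []

-- ===== PORT B =====
-- Stage 1 of B: the is_a ancestor chain as a list of entity names (same fuel, never exhausted).
def pvChain (fuel : Nat) (cur : String) : List String :=
  match fuel with
  | 0 => []
  | fuel + 1 =>
    match PySem.Dict.get? pvKnowledge cur with
    | none => []
    | some node =>
      cur :: (match node.is_a with
              | some parent => pvChain fuel parent
              | none => [])

-- Stage 2 of B: the comprehension, knowledge[e].get('lives_in', []) flattened over the chain.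
def pvLivesIn (e : String) : List String :=
  ((PySem.Dict.get? pvKnowledge e).bind (·.lives_in)).getD []

def get_habitats_alt (entity : String) : List String :=
  (pvChain 10 entity).flatMap pvLivesIn

-- ===== PRECONDITION & SPEC =====
def Spec_get_habitats (entity : String) (out : List String) : Prop := out = get_habitats_alt entity
instance (entity : String) (out : List String) : Decidable (Spec_get_habitats entity out) := by unfold Spec_get_habitats; infer_instance

-- ===== CLAIM (what is proved, stated in full; the proofs are below) =====
def Claim_equal_get_habitats : Prop := ∀ (entity : String), Dom_get_habitats entity → Spec_get_habitats entity (get_habitats entity)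

-- ===== LEMMAS AND PROOFS =====
theorem pvLoopA_eq_chain (fuel : Nat) : ∀ (entity : String) (acc : List String),
    pvLoopA fuel entity acc = acc ++ (pvChain fuel entity).flatMap pvLivesIn := by
  induction fuel with
  | zero => intro e acc; simp [pvLoopA, pvChain]
  | succ n ih =>
    intro e acc
    simp only [pvLoopA, pvChain]
    cases h : PySem.Dict.get? pvKnowledge e with
    | none => simp
    | some node =>
      obtain ⟨isa, li⟩ := node
      cases li <;> cases isa <;> simp [ih, pvLivesIn, h]

-- ===== VERDICT (by name: the statement is the Claim_ definition above) =====
theorem get_habitats_spec : Claim_equal_get_habitats := by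
  intro e _
  show get_habitats e = get_habitats_alt e
  simpa [get_habitats_alt] using pvLoopA_eq_chain 10 e []
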